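-- pv_equiv track=rewrite | github.com/harshal164/M.Tech-codes | sem 2/namita mam/apriori_algorithm.py | c1_set
-- ===== SOURCE A (Python) =====
-- def c1_set(dataset):
--     c_1=[]
--     for d in dataset:
--         for i in d:
--             if [i] not in c_1:
--                 c_1.append([i])
--     c_1.sort()
--     return list(map(set,c_1))
-- ===== SOURCE B (Python) =====
-- def c1_set(dataset):
--     # Flatten, sort, then one linear pass emitting each item the first time
--     # it appears (adjacent-duplicate skip on the sorted list).
--     flat = sorted(i for d in dataset for i in d)
--     out, prev = [], None
--     for i in flat:
--         if prev != i:
--             out.append({i})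
--             prev = i
--     return out
-- ===== Notes on version B (the rewrite author's own statement) =====
-- stated objective: faster
-- what changed: A dedups with a quadratic 'not in' membership scan over a growing list of singletons and sorts at the end; B flattens, sorts once, then deduplicates in one linear pass by comparing each element with the previously emitted one.
import Mathlib
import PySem

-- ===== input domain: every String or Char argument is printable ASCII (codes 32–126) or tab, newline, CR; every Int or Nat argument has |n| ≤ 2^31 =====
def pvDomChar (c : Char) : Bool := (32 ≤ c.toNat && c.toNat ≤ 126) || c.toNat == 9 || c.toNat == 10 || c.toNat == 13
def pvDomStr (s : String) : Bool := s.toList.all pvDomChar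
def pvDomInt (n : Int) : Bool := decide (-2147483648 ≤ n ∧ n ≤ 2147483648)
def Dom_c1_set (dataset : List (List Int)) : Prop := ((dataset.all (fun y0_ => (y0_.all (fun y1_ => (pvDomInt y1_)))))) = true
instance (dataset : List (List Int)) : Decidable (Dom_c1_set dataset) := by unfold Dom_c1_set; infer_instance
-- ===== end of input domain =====

-- B flattens, sorts once and skips adjacent duplicates in one pass, instead of
-- A's membership-scan dedup over a growing list followed by a sort.

-- ===== PORT A =====
def c1_set (dataset : List (List Int)) : List (List Int) :=
  (PySem.List.sorted
     (dataset.foldl (fun c_1 d =>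
        d.foldl (fun c_1 i => if [i] ∈ c_1 then c_1 else c_1 ++ [[i]]) c_1) [])
     (fun x => x) false).map (fun l => PySem.Set.ofList l)

-- ===== PORT B =====
def c1_set_alt (dataset : List (List Int)) : List (List Int) :=
  ((PySem.List.sorted (dataset.flatMap (fun d => d)) (fun x => x) false).foldl
    (fun (st : List (List Int) × Option Int) i =>
      if st.2 ≠ some i then (st.1 ++ [PySem.Set.ofList [i]], some i) else st)
    ([], none)).1

-- ===== PRECONDITION & SPEC =====
def Spec_c1_set (dataset : List (List Int)) (out : List (List Int)) : Prop := out = c1_set_alt dataset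
instance (dataset : List (List Int)) (out : List (List Int)) : Decidable (Spec_c1_set dataset out) := by unfold Spec_c1_set; infer_instance

-- ===== CLAIM (what is proved, stated in full; the proofs are below) =====
def Claim_equal_c1_set : Prop := ∀ (dataset : List (List Int)), Dom_c1_set dataset → Spec_c1_set dataset (c1_set dataset)

-- ===== LEMMAS AND PROOFS =====

-- adjacent-duplicate skip, as performed by B's loop (p is the last emitted item)
def adjDedup : Option Int → List Int → List Int
  | _, [] => []
  | p, i :: rest => if p ≠ some i then i :: adjDedup (some i) rest else adjDedup p rest

theorem b_fold_eq_adjDedup (l : List Int) (out : List (List Int)) (p : Option Int) :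
    (l.foldl (fun (st : List (List Int) × Option Int) i =>
        if st.2 ≠ some i then (st.1 ++ [PySem.Set.ofList [i]], some i) else st) (out, p)).1
      = out ++ (adjDedup p l).map (fun i => [i]) := by
  induction l generalizing out p with
  | nil => simp [adjDedup]
  | cons i rest ih =>
    by_cases h : p = some i
    · have hf : (if p ≠ some i then ((out ++ [PySem.Set.ofList [i]], some i) :
          List (List Int) × Option Int) else (out, p)) = (out, p) := by simp [h]
      simp only [List.foldl_cons, hf, ih]
      simp [adjDedup, h]
    · have hf : (if p ≠ some i then ((out ++ [PySem.Set.ofList [i]], some i) :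
          List (List Int) × Option Int) else (out, p)) = (out ++ [[i]], some i) := by
        simp [h]; rfl
      simp only [List.foldl_cons, hf, ih]
      simp [adjDedup, h]

theorem adjDedup_mem (l : List Int) (p : Option Int) (x : Int)
    (hs : l.Pairwise (· ≤ ·)) (hp : ∀ v, p = some v → ∀ y ∈ l, v ≤ y) :
    x ∈ adjDedup p l ↔ x ∈ l ∧ p ≠ some x := by
  induction l generalizing p with
  | nil => simp [adjDedup]
  | cons i rest ih =>
    have hrest : rest.Pairwise (· ≤ ·) := hs.tail
    have hhead : ∀ y ∈ rest, i ≤ y := fun y hy => List.rel_of_pairwise_cons hs hy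
    have hih := ih (some i) hrest (by rintro v rfl0 y hy; cases rfl0; exact hhead y hy)
    by_cases h : p = some i
    · subst h
      simp only [adjDedup]
      rw [if_neg (by simp), hih]
      constructor
      · rintro ⟨hx, hne⟩; exact ⟨List.mem_cons_of_mem i hx, hne⟩
      · rintro ⟨hx, hne⟩
        rcases List.mem_cons.mp hx with rfl | hx'
        · exact absurd rfl hne
        · exact ⟨hx', hne⟩
    · simp only [adjDedup]
      rw [if_pos h, List.mem_cons, hih]
      constructor
      · rintro (rfl | ⟨hx, hne⟩)
        · exact ⟨List.mem_cons_self, fun hc => h hc⟩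
        · refine ⟨List.mem_cons_of_mem i hx, ?_⟩
          rintro rfl0
          have hxi : x ≠ i := fun he => hne (by rw [he])
          have h1 : x ≤ i := hp x rfl0 i List.mem_cons_self
          have h2 : i ≤ x := hhead x hx
          exact hxi (le_antisymm h1 h2)
      · rintro ⟨hx, hne⟩
        rcases List.mem_cons.mp hx with rfl | hx'
        · exact Or.inl rfl
        · by_cases hxi : x = i
          · exact Or.inl hxi
          · exact Or.inr ⟨hx', fun hc => hxi (by injection hc with hh; exact hh.symm)⟩

theorem adjDedup_pairwise (l : List Int) (p : Option Int)
    (hs : l.Pairwise (· ≤ ·)) (hp : ∀ v, p = some v → ∀ y ∈ l, v ≤ y) :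
    (adjDedup p l).Pairwise (· < ·) := by
  induction l generalizing p with
  | nil => exact List.Pairwise.nil
  | cons i rest ih =>
    have hrest : rest.Pairwise (· ≤ ·) := hs.tail
    have hhead : ∀ y ∈ rest, i ≤ y := fun y hy => List.rel_of_pairwise_cons hs hy
    have hpi : ∀ v, (some i : Option Int) = some v → ∀ y ∈ rest, v ≤ y := by
      rintro v rfl0 y hy; cases rfl0; exact hhead y hy
    by_cases h : p = some i
    · subst h
      simp only [adjDedup]
      rw [if_neg (by simp)]
      exact ih (some i) hrest hpi
    · simp only [adjDedup]
      rw [if_pos h]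
      refine List.Pairwise.cons ?_ (ih (some i) hrest hpi)
      intro y hy
      have hm := (adjDedup_mem rest (some i) y hrest hpi).mp hy
      exact lt_of_le_of_ne (hhead y hm.1) (fun he => hm.2 (by rw [he]))

theorem a_inner_fold (d : List Int) (s : List Int) :
    d.foldl (fun c_1 i => if [i] ∈ c_1 then c_1 else c_1 ++ [[i]]) (s.map (fun i => [i]))
      = (d.foldl PySem.Set.add s).map (fun i => [i]) := by
  induction d generalizing s with
  | nil => rfl
  | cons i rest ih =>
    have hmem : (([i] : List Int) ∈ s.map (fun j => ([j] : List Int))) ↔ i ∈ s := by simp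
    have hadd : PySem.Set.add s i = if i ∈ s then s else s ++ [i] := by
      simp [PySem.Set.add, PySem.Set.contains]
    by_cases h : i ∈ s
    · simp only [List.foldl_cons, if_pos (hmem.mpr h), hadd, if_pos h, ih]
    · have hstep : PySem.Set.add s i = s ++ [i] := by rw [hadd, if_neg h]
      rw [List.foldl_cons, if_neg (fun hc => h (hmem.mp hc)), List.foldl_cons, hstep, ← ih,
        List.map_append]
      rfl

theorem a_outer_fold (dataset : List (List Int)) (s : List Int) :
    dataset.foldl (fun c_1 d =>
        d.foldl (fun c_1 i => if [i] ∈ c_1 then c_1 else c_1 ++ [[i]]) c_1)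
      (s.map (fun i => [i]))
      = (dataset.foldl (fun s d => d.foldl PySem.Set.add s) s).map (fun i => [i]) := by
  induction dataset generalizing s with
  | nil => rfl
  | cons d rest ih =>
    simp only [List.foldl_cons, a_inner_fold, ih]

-- the default (core) lexicographic order on List Int agrees with Mathlib's LinearOrder one
theorem sorted_inst_bridge (xs : List (List Int)) :
    PySem.List.sorted xs (fun x => x) false
      = @PySem.List.sorted (List Int) (List Int) LinearOrder.toPartialOrder.toLT
          LinearOrder.toDecidableLT xs (fun x => x) false := by
  rw [PySem.List.sorted_eq_foldl_insertBy,
    @PySem.List.sorted_eq_foldl_insertBy (List Int) (List Int) LinearOrder.toPartialOrder.toLT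
      LinearOrder.toDecidableLT]
  congr 1
  funext acc x
  congr 1
  funext a b
  exact decide_eq_decide.mpr (List.lt_iff_lex_lt a b)

theorem singleton_lt_singleton (a b : Int) (h : a < b) :
    @LT.lt (List Int) LinearOrder.toPartialOrder.toLT [a] [b] :=
  (List.lex_singleton_iff a b).mpr h

-- ===== VERDICT (by name: the statement is the Claim_ definition above) =====
theorem c1_set_spec : Claim_equal_c1_set := by
  intro dataset _
  unfold Spec_c1_set c1_set c1_set_alt
  have hc1 : dataset.foldl (fun c_1 d =>
      d.foldl (fun c_1 i => if [i] ∈ c_1 then c_1 else c_1 ++ [[i]]) c_1) []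
      = (PySem.Set.ofList (dataset.flatMap (fun d => d))).map (fun i => [i]) := by
    have h := a_outer_fold dataset []
    simp only [List.map_nil] at h
    rw [h, PySem.Set.ofList_eq_foldl, List.foldl_flatMap]
  have hsp : (PySem.List.sorted (dataset.flatMap (fun d => d)) (fun x => x) false).Pairwise
      (· ≤ ·) := PySem.List.sorted_pairwise (dataset.flatMap (fun d => d)) (fun x => x)
  have hB := b_fold_eq_adjDedup (PySem.List.sorted (dataset.flatMap (fun d => d))
      (fun x => x) false) [] none
  simp only [List.nil_append] at hB
  have hnp : ∀ v, (none : Option Int) = some v →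
      ∀ y ∈ PySem.List.sorted (dataset.flatMap (fun d => d)) (fun x => x) false, v ≤ y := by
    rintro v ⟨⟩
  have hupw := adjDedup_pairwise _ none hsp hnp
  have humem : ∀ x, x ∈ adjDedup none (PySem.List.sorted (dataset.flatMap (fun d => d))
      (fun x => x) false) ↔ x ∈ dataset.flatMap (fun d => d) := by
    intro x
    rw [adjDedup_mem _ none x hsp hnp]
    simp [PySem.List.mem_sorted]
  have hund : (adjDedup none (PySem.List.sorted (dataset.flatMap (fun d => d))
      (fun x => x) false)).Nodup := hupw.imp (fun h => ne_of_lt h)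
  have hperm : (adjDedup none (PySem.List.sorted (dataset.flatMap (fun d => d))
      (fun x => x) false)).Perm (PySem.Set.ofList (dataset.flatMap (fun d => d))) := by
    refine List.perm_of_nodup_nodup_toFinset_eq hund
      (PySem.Set.nodup_ofList (dataset.flatMap (fun d => d))) ?_
    ext x
    simp only [List.mem_toFinset, humem x, PySem.Set.mem_ofList]
  have hsortA : PySem.List.sorted ((PySem.Set.ofList (dataset.flatMap (fun d => d))).map
      (fun i => [i])) (fun x => x) false
      = (adjDedup none (PySem.List.sorted (dataset.flatMap (fun d => d))
          (fun x => x) false)).map (fun i => [i]) := by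
    rw [sorted_inst_bridge]
    apply PySem.List.sorted_eq_of_perm_of_pairwise_lt
    · exact hperm.map _
    · rw [List.pairwise_map]
      exact hupw.imp (fun h => singleton_lt_singleton _ _ h)
  rw [hc1, hsortA, hB, List.map_map]
  rfl
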